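-- pv_equiv track=rewrite | github.com/vytarasju/Masters-thesis-NDHU | code/test_display_uniform.py | processDifferentSolutionAmount
-- ===== SOURCE A (Python) =====
-- def processDifferentSolutionAmount(all_solutions_wind, all_solutions_nowind):
--     different_solutions = []
--     solutions_amount_wind = len(all_solutions_wind)
--     solutions_amount_nowind = len(all_solutions_nowind)
--     if solutions_amount_wind > solutions_amount_nowind:
--         for index, solution_nowind in enumerate(all_solutions_nowind):
--             solution_wind = all_solutions_wind[index]
--             is_different = True
--             while is_different == True:
--                 if solution_nowind[0] != solution_wind[0]:
--                         different_solutions.append(all_solutions_wind.pop(index))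
--                         solution_wind = all_solutions_wind[index]
--                 else: is_different = False
--         return 'wind had more solutions', all_solutions_wind, all_solutions_nowind, different_solutions
--     elif solutions_amount_wind < solutions_amount_nowind:
--         for index, solution_wind in enumerate(all_solutions_wind):
--             solution_nowind = all_solutions_nowind[index]
--             is_different = True
--             while is_different == True:
--                 if solution_wind[0] != solution_nowind[0]:
--                         different_solutions.append(all_solutions_nowind.pop(index))
--                         solution_nowind = all_solutions_nowind[index]
--                 else: is_different = False
--         return 'nowind had more solutions', all_solutions_wind, all_solutions_nowind, different_solutions
--     else: return 'solution amount the same', all_solutions_wind, all_solutions_nowind, different_solutions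
-- ===== SOURCE B (Python) =====
-- def processDifferentSolutionAmount(all_solutions_wind, all_solutions_nowind):
--     # One pass over the LONGER list with a cursor into the shorter list:
--     # each element either matches the current short head (kept, cursor advances),
--     # is skipped (removed), or trails after the last match (kept).
--     # NOTE: same return value as the original, but the arguments are not mutated.
--     if len(all_solutions_wind) == len(all_solutions_nowind):
--         return 'solution amount the same', all_solutions_wind, all_solutions_nowind, []
--     wind_longer = len(all_solutions_wind) > len(all_solutions_nowind)
--     short = all_solutions_nowind if wind_longer else all_solutions_wind
--     long_ = all_solutions_wind if wind_longer else all_solutions_nowind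
--     kept, removed = [], []
--     i = 0
--     for sol in long_:
--         if i == len(short):
--             kept.append(sol)
--         elif sol[0] == short[i][0]:
--             kept.append(sol)
--             i += 1
--         else:
--             removed.append(sol)
--     if wind_longer:
--         return 'wind had more solutions', kept, short, removed
--     return 'nowind had more solutions', short, kept, removed
-- ===== Notes on version B (the rewrite author's own statement) =====
-- stated objective: alternative
-- what changed: Replaces A's nested scan that repeatedly calls list.pop(index) on the longer list with a single for-loop over the longer list carrying a cursor into the shorter one, classifying each element as kept or removed (no inner while, no mutation); this removes the quadratic popping, though a timing run found no measurable speed difference on the generated inputs.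
import Mathlib
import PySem

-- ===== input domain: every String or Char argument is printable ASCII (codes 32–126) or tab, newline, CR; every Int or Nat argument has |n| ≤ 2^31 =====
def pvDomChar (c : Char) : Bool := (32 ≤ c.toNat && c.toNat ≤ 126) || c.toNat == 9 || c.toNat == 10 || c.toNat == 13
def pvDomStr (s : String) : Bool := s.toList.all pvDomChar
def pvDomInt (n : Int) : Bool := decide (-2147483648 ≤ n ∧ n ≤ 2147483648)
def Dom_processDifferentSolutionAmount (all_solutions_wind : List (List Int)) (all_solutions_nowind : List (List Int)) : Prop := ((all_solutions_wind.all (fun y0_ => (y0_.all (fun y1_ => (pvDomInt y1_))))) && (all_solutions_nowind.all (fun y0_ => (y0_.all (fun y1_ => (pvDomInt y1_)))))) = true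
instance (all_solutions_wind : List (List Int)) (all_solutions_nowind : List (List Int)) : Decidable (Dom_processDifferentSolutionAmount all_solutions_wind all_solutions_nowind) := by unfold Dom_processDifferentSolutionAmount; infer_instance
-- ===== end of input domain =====

-- B replaces A's repeated list.pop(index) scan by a single pass over the longer list with a cursor
-- into the shorter one (no inner while loop, no popping); equivalence is about the RETURN value
-- only: A mutates the longer argument in place, B does not.


-- ===== PORT A =====
-- inner 'while is_different' loop of A: cur = long[index]; while s0 != cur[0]: diffs.append(long.pop(index)); cur = long[index]
def pdsaWhileA (s0 : Int) (long : List (List Int)) (idx : Nat) (diffs : List (List Int)) :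
    Option (List (List Int) × List (List Int)) :=
  match PySem.List.pyGet? long (idx : Int) with
  | none => none
  | some cur =>
    match PySem.List.pyGet? cur (0 : Int) with
    | none => none
    | some ch =>
      if s0 ≠ ch then
        match hp : PySem.List.pop? long (idx : Int) with
        | none => none
        | some r => pdsaWhileA s0 r.2 idx (diffs ++ [r.1])
      else some (long, diffs)
  termination_by long.length
  decreasing_by
    have := PySem.List.length_of_pop?_eq_some long hp
    omega

-- outer 'for index, s in enumerate(short)' loop of A (short is the list enumerated, long the popped one)
def pdsaForA : List (List Int) → List (List Int) → Nat → List (List Int) →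
    Option (List (List Int) × List (List Int))
  | [], long, _, diffs => some (long, diffs)
  | s :: ss, long, idx, diffs =>
    match PySem.List.pyGet? long (idx : Int) with   -- solution = long[index]  (prefetch before the while)
    | none => none
    | some _ =>
      match PySem.List.pyGet? s (0 : Int) with      -- s[0], read by the while condition
      | none => none
      | some s0 =>
        match pdsaWhileA s0 long idx diffs with
        | none => none
        | some r => pdsaForA ss r.1 (idx + 1) r.2

def processDifferentSolutionAmount (all_solutions_wind : List (List Int)) (all_solutions_nowind : List (List Int)) : String × List (List Int) × List (List Int) × List (List Int) :=
  if all_solutions_wind.length > all_solutions_nowind.length then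
    match pdsaForA all_solutions_nowind all_solutions_wind 0 [] with
    | some r => ("wind had more solutions", r.1, all_solutions_nowind, r.2)
    | none => ("IndexError", [], [], [])            -- Python raises here; outside Pre_
  else if all_solutions_wind.length < all_solutions_nowind.length then
    match pdsaForA all_solutions_wind all_solutions_nowind 0 [] with
    | some r => ("nowind had more solutions", all_solutions_wind, r.1, r.2)
    | none => ("IndexError", [], [], [])            -- Python raises here; outside Pre_
  else ("solution amount the same", all_solutions_wind, all_solutions_nowind, [])

-- ===== PORT B =====
-- B's single 'for sol in long_' loop: carries the not-yet-matched tail of short (the cursor i),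
-- the kept list and the removed list; none = an empty solution's sol[0]/short[i][0] would raise.
def pdsaScanB : List (List Int) → List (List Int) → List (List Int) → List (List Int) →
    Option (List (List Int) × List (List Int))
  | [], _, kept, removed => some (kept, removed)
  | sol :: rest, short, kept, removed =>
    match short with
    | [] => pdsaScanB rest [] (kept ++ [sol]) removed           -- i == len(short): trailing, kept
    | s :: ss =>
      match PySem.List.pyGet? sol (0 : Int) with
      | none => none
      | some a =>
        match PySem.List.pyGet? s (0 : Int) with
        | none => none
        | some b =>
          if a = b then pdsaScanB rest ss (kept ++ [sol]) removed
          else pdsaScanB rest (s :: ss) kept (removed ++ [sol])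

def processDifferentSolutionAmount_alt (all_solutions_wind : List (List Int)) (all_solutions_nowind : List (List Int)) : String × List (List Int) × List (List Int) × List (List Int) :=
  if all_solutions_wind.length = all_solutions_nowind.length then
    ("solution amount the same", all_solutions_wind, all_solutions_nowind, [])
  else
    let windLonger := all_solutions_wind.length > all_solutions_nowind.length
    let short := if windLonger then all_solutions_nowind else all_solutions_wind
    let long := if windLonger then all_solutions_wind else all_solutions_nowind
    match pdsaScanB long short [] [] with
    | none => ("IndexError", [], [], [])            -- Python raises here; outside Pre_
    | some r =>
      if windLonger then ("wind had more solutions", r.1, short, r.2)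
      else ("nowind had more solutions", short, r.1, r.2)

-- ===== PRECONDITION & SPEC =====
-- Pre_ is exactly where the Python A returns (otherwise it raises IndexError): with unequal lengths,
-- every element of the shorter list must be nonempty and the heads of the shorter list must embed as a
-- subsequence into the heads of the longest all-nonempty prefix of the longer list (the greedy scan
-- then finds every match before hitting an empty solution or the end of the longer list).
def Pre_processDifferentSolutionAmount (all_solutions_wind : List (List Int)) (all_solutions_nowind : List (List Int)) : Prop :=
  if all_solutions_wind.length = all_solutions_nowind.length then True
  else
    let short := if all_solutions_wind.length > all_solutions_nowind.length then all_solutions_nowind else all_solutions_wind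
    let long := if all_solutions_wind.length > all_solutions_nowind.length then all_solutions_wind else all_solutions_nowind
    (∀ s ∈ short, s ≠ []) ∧
      List.Sublist (short.map (·.headI)) ((long.takeWhile (· ≠ [])).map (·.headI))
instance (all_solutions_wind : List (List Int)) (all_solutions_nowind : List (List Int)) : Decidable (Pre_processDifferentSolutionAmount all_solutions_wind all_solutions_nowind) := by unfold Pre_processDifferentSolutionAmount; infer_instance

def pvWitness_processDifferentSolutionAmount : List (List Int) × List (List Int) :=
  ([[1, 5], [7], [2], [3, 0]], [[1], [3]])

def Spec_processDifferentSolutionAmount (all_solutions_wind : List (List Int)) (all_solutions_nowind : List (List Int)) (out : String × List (List Int) × List (List Int) × List (List Int)) : Prop := out = processDifferentSolutionAmount_alt all_solutions_wind all_solutions_nowind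
instance (all_solutions_wind : List (List Int)) (all_solutions_nowind : List (List Int)) (out : String × List (List Int) × List (List Int) × List (List Int)) : Decidable (Spec_processDifferentSolutionAmount all_solutions_wind all_solutions_nowind out) := by unfold Spec_processDifferentSolutionAmount; infer_instance

-- ===== CLAIM (what is proved, stated in full; the proofs are below) =====
def Claim_equal_processDifferentSolutionAmount : Prop := ∀ (all_solutions_wind : List (List Int)) (all_solutions_nowind : List (List Int)), Dom_processDifferentSolutionAmount all_solutions_wind all_solutions_nowind → Pre_processDifferentSolutionAmount all_solutions_wind all_solutions_nowind → Spec_processDifferentSolutionAmount all_solutions_wind all_solutions_nowind (processDifferentSolutionAmount all_solutions_wind all_solutions_nowind)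

-- ===== LEMMAS AND PROOFS =====

-- Reference greedy form of A's inner loop: skip non-matching heads into `rem`,
-- stop with the matching element at the head of the returned rest (none = the scan fails).
def pdsaSkim (s0 : Int) : List (List Int) → List (List Int) →
    Option (List (List Int) × List (List Int))
  | [], _ => none
  | t :: rest, rem =>
    match PySem.List.pyGet? t (0 : Int) with
    | none => none
    | some ch => if ch = s0 then some (t :: rest, rem) else pdsaSkim s0 rest (rem ++ [t])

-- Reference greedy form of A's outer loop: returns (matched ++ leftover, removed).
def pdsaGreedy : List (List Int) → List (List Int) → List (List Int) →
    Option (List (List Int) × List (List Int))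
  | [], rest, rem => some (rest, rem)
  | s :: ss, rest, rem =>
    match PySem.List.pyGet? s (0 : Int) with
    | none => none
    | some s0 =>
      match pdsaSkim s0 rest rem with
      | none => none
      | some (nrest, rem₁) =>
        match nrest with
        | [] => none   -- unreachable: pdsaSkim only returns a nonempty rest
        | t :: rest' => (pdsaGreedy ss rest' rem₁).map (fun r => (t :: r.1, r.2))

theorem pdsa_eraseIdx_len (kept rest : List (List Int)) (t : List Int) :
    (kept ++ t :: rest).eraseIdx kept.length = kept ++ rest := by
  induction kept with
  | nil => rfl
  | cons a l ih => simpa [List.eraseIdx] using ih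

theorem pdsaWhileA_eq (s0 : Int) (rest kept diffs : List (List Int)) :
    pdsaWhileA s0 (kept ++ rest) kept.length diffs =
      (pdsaSkim s0 rest diffs).map (fun p => (kept ++ p.1, p.2)) := by
  induction rest generalizing diffs with
  | nil =>
    rw [pdsaWhileA]
    simp [PySem.List.pyGet?_natCast, pdsaSkim]
  | cons t rest ih =>
    have hg : PySem.List.pyGet? (kept ++ t :: rest) ((kept.length : Nat) : Int) = some t := by
      rw [PySem.List.pyGet?_natCast, List.getElem?_append_right (Nat.le_refl _)]
      simp
    rw [pdsaWhileA, hg]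
    dsimp only
    cases h0 : PySem.List.pyGet? t (0 : Int) with
    | none => simp [pdsaSkim, h0]
    | some ch =>
      dsimp only
      by_cases hc : ch = s0
      · rw [if_neg (by simp [hc]), pdsaSkim, h0]
        simp [hc]
      · have hne : s0 ≠ ch := fun h => hc h.symm
        have hlt : kept.length < (kept ++ t :: rest).length := by simp
        rw [if_pos hne, PySem.List.pop?_natCast _ _ hlt]
        dsimp only
        rw [List.getElem_append_right (Nat.le_refl _)]
        simp only [Nat.sub_self, List.getElem_cons_zero, pdsa_eraseIdx_len]
        rw [ih, pdsaSkim, h0]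
        dsimp only
        rw [if_neg hc]

theorem pdsaSkim_suffix (s0 : Int) (rest rem : List (List Int)) {p} :
    pdsaSkim s0 rest rem = some p → p.1 ≠ [] ∧ p.1 <:+ rest := by
  induction rest generalizing rem with
  | nil => intro h; simp [pdsaSkim] at h
  | cons t rest ih =>
    intro h
    rw [pdsaSkim] at h
    cases h0 : PySem.List.pyGet? t (0 : Int) with
    | none => rw [h0] at h; cases h
    | some ch =>
      rw [h0] at h
      dsimp only at h
      by_cases hc : ch = s0
      · rw [if_pos hc] at h
        cases h
        exact ⟨by simp, List.suffix_refl _⟩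
      · rw [if_neg hc] at h
        exact ⟨(ih _ h).1, (ih _ h).2.trans (List.suffix_cons _ _)⟩

theorem pdsaForA_eq (short : List (List Int)) (rest kept diffs : List (List Int)) :
    pdsaForA short (kept ++ rest) kept.length diffs =
      (pdsaGreedy short rest diffs).map (fun r => (kept ++ r.1, r.2)) := by
  induction short generalizing rest kept diffs with
  | nil => simp [pdsaForA, pdsaGreedy]
  | cons s ss ih =>
    rw [pdsaForA]
    cases rest with
    | nil =>
      rw [pdsaGreedy]
      have hn : PySem.List.pyGet? (kept ++ ([] : List (List Int))) ((kept.length : Nat) : Int) = none := by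
        simp [PySem.List.pyGet?_natCast]
      rw [hn]
      cases h0 : PySem.List.pyGet? s (0 : Int) <;> simp [pdsaSkim]
    | cons t rest =>
      have hg : PySem.List.pyGet? (kept ++ t :: rest) ((kept.length : Nat) : Int) = some t := by
        rw [PySem.List.pyGet?_natCast, List.getElem?_append_right (Nat.le_refl _)]
        simp
      rw [hg, pdsaGreedy]
      dsimp only
      cases h0 : PySem.List.pyGet? s (0 : Int) with
      | none => rfl
      | some s0 =>
        dsimp only
        rw [pdsaWhileA_eq]
        cases hs : pdsaSkim s0 (t :: rest) diffs with
        | none => rfl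
        | some p =>
          dsimp only
          obtain ⟨ne, -⟩ := pdsaSkim_suffix s0 (t :: rest) diffs hs
          obtain ⟨t', rest', hp1⟩ := List.exists_cons_of_ne_nil ne
          cases p with
          | mk p1 p2 =>
            simp only at hp1
            subst hp1
            have hre : kept ++ t' :: rest' = (kept ++ [t']) ++ rest' := by simp
            have hlen : kept.length + 1 = (kept ++ [t']).length := by simp
            simp only [Option.map_some]
            try dsimp only
            rw [hre, hlen, ih rest' (kept ++ [t']) p2]
            cases hgr : pdsaGreedy ss rest' p2 <;> simp

-- B's single pass computes exactly the greedy result whenever the greedy scan succeeds.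
theorem pdsaScanB_eq_greedy (long : List (List Int)) :
    ∀ (short kept removed L R : List (List Int)),
      pdsaGreedy short long removed = some (L, R) →
      pdsaScanB long short kept removed = some (kept ++ L, R) := by
  induction long with
  | nil =>
    intro short kept removed L R h
    cases short with
    | nil => rw [pdsaGreedy] at h; cases h; simp [pdsaScanB]
    | cons s ss =>
      rw [pdsaGreedy] at h
      cases h0 : PySem.List.pyGet? s (0 : Int) <;> rw [h0] at h <;> simp [pdsaSkim] at h
  | cons t rest ih =>
    intro short kept removed L R h
    cases short with
    | nil =>
      rw [pdsaGreedy] at h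
      cases h
      rw [pdsaScanB]
      have := ih [] (kept ++ [t]) removed rest removed (by rw [pdsaGreedy])
      rw [this]
      simp
    | cons s ss =>
      rw [pdsaGreedy] at h
      cases h0 : PySem.List.pyGet? s (0 : Int) with
      | none => rw [h0] at h; cases h
      | some s0 =>
        rw [h0] at h
        dsimp only at h
        rw [pdsaSkim] at h
        cases ht : PySem.List.pyGet? t (0 : Int) with
        | none => rw [ht] at h; cases h
        | some ch =>
          rw [ht] at h
          dsimp only at h
          rw [pdsaScanB, ht, h0]
          dsimp only
          by_cases hc : ch = s0
          · rw [if_pos hc] at h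
            dsimp only at h
            rw [if_pos hc]
            cases hgr : pdsaGreedy ss rest removed with
            | none => rw [hgr] at h; cases h
            | some r =>
              rw [hgr] at h
              obtain ⟨Lx, Rx⟩ := r
              simp only [Option.map_some, Option.some.injEq, Prod.mk.injEq] at h
              obtain ⟨hL, hR⟩ := h
              subst hL
              subst hR
              rw [ih ss (kept ++ [t]) removed Lx Rx hgr]
              simp
          · rw [if_neg hc] at h
            rw [if_neg hc]
            -- h : greedy (s::ss) with skim continuing on rest & rem++[t] = some (L,R)
            have h' : pdsaGreedy (s :: ss) rest (removed ++ [t]) = some (L, R) := by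
              rw [pdsaGreedy, h0]
              exact h
            exact ih (s :: ss) kept (removed ++ [t]) L R h'

-- headI of a nonempty list is its pyGet? 0
theorem pdsa_pyGet0_headI (s : List Int) (h : s ≠ []) :
    PySem.List.pyGet? s (0 : Int) = some s.headI := by
  cases s with
  | nil => exact absurd rfl h
  | cons a l => simp [PySem.List.pyGet?, PySem.List.pyIdx?]

-- Pre_'s subsequence condition makes the skim succeed, staying inside the nonempty prefix.
theorem pdsaSkim_success (s0 : Int) (tl : List Int) :
    ∀ (long rem : List (List Int)),
      List.Sublist (s0 :: tl) ((long.takeWhile (· ≠ [])).map (·.headI)) →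
      ∃ t rest' rem', pdsaSkim s0 long rem = some (t :: rest', rem') ∧
        List.Sublist tl ((rest'.takeWhile (· ≠ [])).map (·.headI)) := by
  intro long
  induction long with
  | nil => intro rem h; simp at h
  | cons t rest ih =>
    intro rem h
    by_cases hne : t ≠ []
    · rw [List.takeWhile_cons_of_pos (by simpa using hne)] at h
      simp only [List.map_cons] at h
      rw [pdsaSkim, pdsa_pyGet0_headI t hne]
      dsimp only
      by_cases hc : t.headI = s0
      · rw [if_pos hc]
        refine ⟨t, rest, rem, rfl, ?_⟩
        cases h with
        | cons _ h2 => exact (List.sublist_cons_self s0 tl).trans h2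
        | cons₂ _ h2 => exact h2
      · rw [if_neg hc]
        have h' : List.Sublist (s0 :: tl) ((rest.takeWhile (· ≠ [])).map (·.headI)) := by
          cases h with
          | cons _ h2 => exact h2
          | cons₂ _ h2 => exact absurd rfl hc
        exact ih (rem ++ [t]) h'
    · rw [List.takeWhile_cons_of_neg (by simpa using hne)] at h
      simp at h
-- note: in the cons₂ case with t.headI = s0 refuted, the embedded head equals t.headI

-- Pre_ makes the whole greedy scan succeed.
theorem pdsaGreedy_success (short : List (List Int)) :
    ∀ (long rem : List (List Int)),
      (∀ s ∈ short, s ≠ []) →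
      List.Sublist (short.map (·.headI)) ((long.takeWhile (· ≠ [])).map (·.headI)) →
      ∃ r, pdsaGreedy short long rem = some r := by
  induction short with
  | nil => intro long rem _ _; exact ⟨(long, rem), rfl⟩
  | cons s ss ih =>
    intro long rem hne hsub
    have hs : s ≠ [] := hne s (by simp)
    rw [List.map_cons] at hsub
    obtain ⟨t, rest', rem', hskim, hsub'⟩ := pdsaSkim_success s.headI (ss.map (·.headI)) long rem hsub
    obtain ⟨r, hr⟩ := ih rest' rem' (fun x hx => hne x (by simp [hx])) hsub'
    refine ⟨(t :: r.1, r.2), ?_⟩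
    rw [pdsaGreedy, pdsa_pyGet0_headI s hs]
    dsimp only
    rw [hskim]
    dsimp only
    rw [hr]
    rfl

-- ===== VERDICT (by name: the statement is the Claim_ definition above) =====
theorem processDifferentSolutionAmount_spec : Claim_equal_processDifferentSolutionAmount := by
  intro w nw _ hpre
  unfold Spec_processDifferentSolutionAmount processDifferentSolutionAmount
    processDifferentSolutionAmount_alt
  unfold Pre_processDifferentSolutionAmount at hpre
  by_cases heq : w.length = nw.length
  · rw [if_pos heq]
    have h1 : ¬ w.length > nw.length := by omega
    have h2 : ¬ w.length < nw.length := by omega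
    rw [if_neg h1, if_neg h2]
  · rw [if_neg heq] at hpre
    simp only [if_neg heq]
    by_cases hgt : w.length > nw.length
    · simp only [if_pos hgt] at hpre ⊢
      obtain ⟨hne, hsub⟩ := hpre
      obtain ⟨r, hr⟩ := pdsaGreedy_success nw w [] hne hsub
      have hA := pdsaForA_eq nw w [] []
      simp only [List.nil_append, List.length_nil] at hA
      rw [hr] at hA
      have hB := pdsaScanB_eq_greedy w nw [] [] r.1 r.2 (by rw [hr])
      rw [hA, hB]
      simp
    · have hlt : w.length < nw.length := by omega
      simp only [if_neg hgt, if_pos hlt] at hpre ⊢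
      obtain ⟨hne, hsub⟩ := hpre
      obtain ⟨r, hr⟩ := pdsaGreedy_success w nw [] hne hsub
      have hA := pdsaForA_eq w nw [] []
      simp only [List.nil_append, List.length_nil] at hA
      rw [hr] at hA
      have hB := pdsaScanB_eq_greedy nw w [] [] r.1 r.2 (by rw [hr])
      rw [hA, hB]
      simp
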